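-- pv_equiv track=rewrite | github.com/eevdriet/advent-of-code | python/src/_2020/day_06_custom_customs.py | part2
-- ===== SOURCE A (Python) =====
-- Group = list[str]
--
-- def part2(groups: list[Group]) -> int:
--     count_sum = 0
--
--     for group in groups:
--         first_person, *other_people = group
--         questions = set(first_person)
--
--         for person_questions in other_people:
--             questions.intersection_update({question for question in person_questions})
--
--         count_sum += len(questions)
--
--     return count_sum
-- ===== SOURCE B (Python) =====
-- def part2(groups):
--     total = 0
--     for group in groups:
--         counts = {}
--         for person in group:
--             for q in set(person):
--                 counts[q] = counts.get(q, 0) + 1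
--         total += sum(1 for c in counts.values() if c == len(group))
--     return total
-- ===== Notes on version B (the rewrite author's own statement) =====
-- stated objective: alternative
-- what changed: Per group, B builds one character-frequency table (each person contributing each distinct character once) and counts characters whose tally equals the number of people, instead of A's repeated set-intersection updates; Pre_ excludes inputs containing an empty group, on which A raises ValueError.
import Mathlib
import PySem

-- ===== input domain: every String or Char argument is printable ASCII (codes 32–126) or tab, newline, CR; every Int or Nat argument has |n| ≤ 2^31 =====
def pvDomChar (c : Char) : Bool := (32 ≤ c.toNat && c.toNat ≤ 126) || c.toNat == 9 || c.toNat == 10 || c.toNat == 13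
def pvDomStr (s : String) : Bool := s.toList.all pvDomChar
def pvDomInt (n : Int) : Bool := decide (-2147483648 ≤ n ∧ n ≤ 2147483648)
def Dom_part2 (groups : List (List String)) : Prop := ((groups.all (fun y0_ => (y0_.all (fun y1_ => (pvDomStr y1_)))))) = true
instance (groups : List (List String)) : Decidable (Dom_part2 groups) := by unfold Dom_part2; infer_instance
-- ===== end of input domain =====

-- B replaces A's repeated set-intersection updates by one per-group frequency table with a
-- people-count threshold (alternative algorithm, similar cost); on a group that is empty A
-- raises ValueError (excluded by Pre_), B returns a value there.

-- ===== PORT A =====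
def part2 (groups : List (List String)) : Int :=
  groups.foldl (fun count_sum group =>
    match group with
    | [] => count_sum  -- Python raises ValueError here; excluded by Pre_part2
    | first_person :: other_people =>
      let questions : PySem.Set Char := PySem.Set.ofList first_person.toList
      let questions := other_people.foldl
        (fun qs person_questions =>
          PySem.Set.inter qs (PySem.Set.ofList person_questions.toList)) questions
      count_sum + (questions.length : Int)) 0

-- ===== PORT B =====
def part2_alt (groups : List (List String)) : Int :=
  groups.foldl (fun total group =>
    let counts : PySem.Dict Char Int :=
      group.foldl (fun d person =>
        (PySem.Set.ofList person.toList).foldl (fun d q => d.modify q 0 (· + 1)) d)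
        PySem.Dict.empty
    total + counts.values.foldl (fun s c => if c = (group.length : Int) then s + 1 else s) 0) 0

-- ===== PRECONDITION & SPEC =====
-- Pre_ excludes inputs containing an empty group: A raises ValueError there (unpacking 'first, *rest').
def Pre_part2 (groups : List (List String)) : Prop := ∀ g ∈ groups, g ≠ []
instance (groups : List (List String)) : Decidable (Pre_part2 groups) := by unfold Pre_part2; infer_instance
def pvWitness_part2 : List (List String) := [["ab", "bc"], ["x"]]

def Spec_part2 (groups : List (List String)) (out : Int) : Prop := out = part2_alt groups
instance (groups : List (List String)) (out : Int) : Decidable (Spec_part2 groups out) := by unfold Spec_part2; infer_instance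

-- ===== CLAIM (what is proved, stated in full; the proofs are below) =====
def Claim_equal_part2 : Prop := ∀ (groups : List (List String)), Dom_part2 groups → Pre_part2 groups → Spec_part2 groups (part2 groups)

-- ===== LEMMAS AND PROOFS =====

-- all distinct characters answered by anyone in the group, with per-person duplicates collapsed
def pvAll (group : List String) : List Char :=
  group.flatMap (fun p => PySem.Set.ofList p.toList)

theorem counts_eq_counter (group : List String) :
    group.foldl (fun d person =>
        (PySem.Set.ofList person.toList).foldl (fun d q => d.modify q 0 (· + 1)) d)
      PySem.Dict.empty = PySem.Dict.counter (pvAll group) := by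
  unfold pvAll
  rw [PySem.Dict.counter_eq_foldl, List.foldl_flatMap]

theorem foldl_if_count (l : List Int) (n : Int) (s : Int) :
    l.foldl (fun s c => if c = n then s + 1 else s) s
      = s + (l.countP (fun c => decide (c = n)) : Int) := by
  induction l generalizing s with
  | nil => simp
  | cons x xs ih =>
    simp only [List.foldl_cons, List.countP_cons, ih]
    by_cases h : x = n
    · simp [h]; ring
    · simp [h]

theorem count_pvAll (group : List String) (c : Char) :
    (pvAll group).count c = group.countP (fun p => decide (c ∈ p.toList)) := by
  induction group with
  | nil => rfl
  | cons p rest ih =>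
    unfold pvAll at *
    rw [List.flatMap_cons, List.count_append, List.countP_cons, ih]
    by_cases h : c ∈ p.toList
    · have h' : c ∈ PySem.Set.ofList p.toList := (PySem.Set.mem_ofList _ _).2 h
      rw [List.count_eq_one_of_mem (PySem.Set.nodup_ofList _) h']
      simp [h]; omega
    · have h' : c ∉ PySem.Set.ofList p.toList := fun hc => h ((PySem.Set.mem_ofList _ _).1 hc)
      rw [List.count_eq_zero_of_not_mem h']
      simp [h]

theorem mem_inter_foldl (rest : List String) (qs : PySem.Set Char) (c : Char) :
    c ∈ rest.foldl (fun qs p => PySem.Set.inter qs (PySem.Set.ofList p.toList)) qs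
      ↔ c ∈ qs ∧ ∀ p ∈ rest, c ∈ p.toList := by
  induction rest generalizing qs with
  | nil => simp
  | cons p rest ih =>
    simp only [List.foldl_cons, ih, PySem.Set.mem_inter, PySem.Set.mem_ofList,
      List.mem_cons]
    constructor
    · rintro ⟨⟨h1, h2⟩, h3⟩
      refine ⟨h1, ?_⟩
      rintro q (rfl | hq)
      · exact h2
      · exact h3 q hq
    · rintro ⟨h1, h2⟩
      exact ⟨⟨h1, h2 p (Or.inl rfl)⟩, fun q hq => h2 q (Or.inr hq)⟩

theorem nodup_inter_foldl (rest : List String) (qs : PySem.Set Char) (h : qs.Nodup) :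
    (rest.foldl (fun qs p => PySem.Set.inter qs (PySem.Set.ofList p.toList)) qs).Nodup := by
  induction rest generalizing qs with
  | nil => exact h
  | cons p rest ih => exact ih _ (PySem.Set.nodup_inter _ _ h)

theorem group_val_eq (first : String) (rest : List String) :
    (rest.foldl (fun d person =>
        (PySem.Set.ofList person.toList).foldl (fun d q => d.modify q 0 (· + 1)) d)
      ((PySem.Set.ofList first.toList).foldl (fun d q => d.modify q 0 (· + 1))
        PySem.Dict.empty)).values.foldl
        (fun s c => if c = ((first :: rest).length : Int) then s + 1 else s) 0
      = ((rest.foldl (fun qs p => PySem.Set.inter qs (PySem.Set.ofList p.toList))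
          (PySem.Set.ofList first.toList)).length : Int) := by
  rw [show (rest.foldl (fun d person =>
        (PySem.Set.ofList person.toList).foldl (fun d q => d.modify q 0 (· + 1)) d)
      ((PySem.Set.ofList first.toList).foldl (fun d q => d.modify q 0 (· + 1))
        (PySem.Dict.empty : PySem.Dict Char Int)))
    = ((first :: rest).foldl (fun d person =>
        (PySem.Set.ofList person.toList).foldl (fun d q => d.modify q 0 (· + 1)) d)
      PySem.Dict.empty) from rfl]
  set group : List String := first :: rest with hgroup
  set S := rest.foldl (fun qs p => PySem.Set.inter qs (PySem.Set.ofList p.toList))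
      (PySem.Set.ofList first.toList) with hS
  rw [counts_eq_counter]
  have hvals : (PySem.Dict.counter (pvAll group)).values
      = (PySem.Set.ofList (pvAll group)).map (fun k => ((pvAll group).count k : Int)) := by
    rw [PySem.Dict.values, PySem.Dict.items_counter, List.map_map]
    rfl
  rw [hvals, foldl_if_count, List.countP_map]
  have hcnt : ∀ k : Char,
      ((fun c => decide (c = (group.length : Int))) ∘
        (fun k => ((pvAll group).count k : Int))) k
      = decide (group.countP (fun p => decide (k ∈ p.toList)) = group.length) := by
    intro k
    simp only [Function.comp, count_pvAll]
    by_cases h : group.countP (fun p => decide (k ∈ p.toList)) = group.length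
    · simp [h]
    · simp [h]
  have h1 : List.countP ((fun c => decide (c = (group.length : Int))) ∘
        (fun k => ((pvAll group).count k : Int))) (PySem.Set.ofList (pvAll group))
      = List.countP (fun k => decide (group.countP (fun p => decide (k ∈ p.toList)) = group.length))
          (PySem.Set.ofList (pvAll group)) :=
    List.countP_congr (fun k _ => by rw [hcnt k])
  have hperm : ((PySem.Set.ofList (pvAll group)).filter
      (fun k => decide (group.countP (fun p => decide (k ∈ p.toList)) = group.length))).Perm S := by
    rw [List.perm_ext_iff_of_nodup (List.Nodup.filter _ (PySem.Set.nodup_ofList _))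
      (nodup_inter_foldl _ _ (PySem.Set.nodup_ofList _))]
    intro c
    rw [List.mem_filter, mem_inter_foldl, PySem.Set.mem_ofList, PySem.Set.mem_ofList]
    have hall : (decide (group.countP (fun p => decide (c ∈ p.toList)) = group.length) = true)
        ↔ ∀ p ∈ group, c ∈ p.toList := by
      rw [decide_eq_true_iff, List.countP_eq_length]
      simp
    rw [hall]
    constructor
    · rintro ⟨_, h2⟩
      exact ⟨h2 first (by simp [hgroup]), fun p hp => h2 p (by simp [hgroup, hp])⟩
    · rintro ⟨h1, h2⟩
      refine ⟨?_, ?_⟩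
      · unfold pvAll
        rw [List.mem_flatMap]
        exact ⟨first, by simp [hgroup], (PySem.Set.mem_ofList _ _).2 h1⟩
      · intro p hp
        rcases (by simpa [hgroup] using hp : p = first ∨ p ∈ rest) with rfl | hp
        · exact h1
        · exact h2 p hp
  rw [h1, List.countP_eq_length_filter, hperm.length_eq]
  simp

theorem foldl_main (groups : List (List String)) (acc : Int)
    (hpre : ∀ g ∈ groups, g ≠ []) :
    groups.foldl (fun count_sum group =>
      match group with
      | [] => count_sum
      | first_person :: other_people =>
        let questions : PySem.Set Char := PySem.Set.ofList first_person.toList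
        let questions := other_people.foldl
          (fun qs person_questions =>
            PySem.Set.inter qs (PySem.Set.ofList person_questions.toList)) questions
        count_sum + (questions.length : Int)) acc
    = groups.foldl (fun total group =>
        let counts : PySem.Dict Char Int :=
          group.foldl (fun d person =>
            (PySem.Set.ofList person.toList).foldl (fun d q => d.modify q 0 (· + 1)) d)
            PySem.Dict.empty
        total + counts.values.foldl
          (fun s c => if c = (group.length : Int) then s + 1 else s) 0) acc := by
  induction groups generalizing acc with
  | nil => rfl
  | cons g rest ih =>
    rcases g with _ | ⟨first, others⟩
    · exact absurd rfl (hpre [] (by simp))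
    · simp only [List.foldl_cons]
      rw [ih _ (fun g hg => hpre g (by simp [hg]))]
      congr 1
      rw [group_val_eq]

-- ===== VERDICT (by name: the statement is the Claim_ definition above) =====
theorem part2_spec : Claim_equal_part2 := by
  intro groups _ hpre
  unfold Spec_part2 part2 part2_alt
  exact foldl_main groups 0 hpre
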